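-- pv_equiv track=rewrite | github.com/EnzeHu0120/Ticker_Analysis_LLM_Pipeline_v2 | streamlit_terminal_ui.py | _max_risk_severity
-- ===== SOURCE A (Python) =====
-- from typing import Any, Dict, List, Mapping, Optional, Sequence, Tuple
--
-- def _risk_flags_list(risk_flags: Any) -> List[Dict[str, str]]:
--     out: List[Dict[str, str]] = []
--     if isinstance(risk_flags, list):
--         for item in risk_flags:
--             if isinstance(item, Mapping):
--                 out.append(
--                     {
--                         "type": str(item.get("type") or ""),
--                         "severity": str(item.get("severity") or ""),
--                         "summary": str(item.get("summary") or ""),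
--                     }
--                 )
--     return out
--
-- def _max_risk_severity(risk_flags: Any) -> str:
--     rank = {"none": 0, "low": 1, "medium": 2, "high": 3}
--     best = "none"
--     for row in _risk_flags_list(risk_flags):
--         sev = row["severity"].lower()
--         if sev in rank and rank[sev] > rank[best]:
--             best = sev
--     return best
-- ===== SOURCE B (Python) =====
-- from typing import Any, Dict, List, Mapping, Optional, Sequence, Tuple
--
-- def _risk_flags_list(risk_flags: Any) -> List[Dict[str, str]]:
--     out: List[Dict[str, str]] = []
--     if isinstance(risk_flags, list):
--         for item in risk_flags:
--             if isinstance(item, Mapping):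
--                 out.append(
--                     {
--                         "type": str(item.get("type") or ""),
--                         "severity": str(item.get("severity") or ""),
--                         "summary": str(item.get("summary") or ""),
--                     }
--                 )
--     return out
--
-- def _max_risk_severity(risk_flags: Any) -> str:
--     present = {row["severity"].lower() for row in _risk_flags_list(risk_flags)}
--     for level in ("high", "medium", "low"):
--         if level in present:
--             return level
--     return "none"
-- ===== Notes on version B (the rewrite author's own statement) =====
-- stated objective: idiomatic
-- what changed: Replaces the running-max rank scan (dict of ranks, compare-and-update accumulator) with a set comprehension of the severities present followed by a descending-priority membership probe with early return.
import Mathlib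
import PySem

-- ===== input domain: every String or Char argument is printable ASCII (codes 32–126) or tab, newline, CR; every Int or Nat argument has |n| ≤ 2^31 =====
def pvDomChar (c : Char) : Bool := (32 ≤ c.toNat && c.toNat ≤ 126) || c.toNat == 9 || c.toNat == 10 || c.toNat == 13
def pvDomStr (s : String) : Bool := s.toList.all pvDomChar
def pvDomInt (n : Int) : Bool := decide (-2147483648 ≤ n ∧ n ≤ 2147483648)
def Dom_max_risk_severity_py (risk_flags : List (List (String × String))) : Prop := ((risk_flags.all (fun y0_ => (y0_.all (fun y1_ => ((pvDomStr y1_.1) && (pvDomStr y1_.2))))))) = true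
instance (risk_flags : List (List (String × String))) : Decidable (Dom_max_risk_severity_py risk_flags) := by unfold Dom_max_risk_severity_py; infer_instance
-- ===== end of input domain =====

-- B replaces A's running-max rank scan with a set of present severities probed in priority order (idiomatic; same O(n) cost).


-- ===== PORT A =====
-- shared helper _risk_flags_list (identical in Source A and Source B): `item.get(k) or ""`
def pyOrEmpty (o : Option String) : String :=
  match o with
  | none => ""
  | some s => if s = "" then "" else s

-- the dict literal {"type": …, "severity": …, "summary": …} built for one item
def riskRow (item : List (String × String)) : PySem.Dict String String :=
  PySem.Dict.mk
    [ ("type", pyOrEmpty ((PySem.Dict.ofList item).get? "type")),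
      ("severity", pyOrEmpty ((PySem.Dict.ofList item).get? "severity")),
      ("summary", pyOrEmpty ((PySem.Dict.ofList item).get? "summary")) ]

-- _risk_flags_list: append loop (every item is a Mapping under the Lean type)
def riskFlagsList (risk_flags : List (List (String × String))) : List (PySem.Dict String String) :=
  risk_flags.foldl (fun out item => out ++ [riskRow item]) []

-- _max_risk_severity (A): running-max over the rank dict.
-- row["severity"] never raises (the key is always present in riskRow), so it is ported as getD with default "".
def max_risk_severity_py (risk_flags : List (List (String × String))) : String :=
  let rank : PySem.Dict String Int :=
    PySem.Dict.mk [("none", 0), ("low", 1), ("medium", 2), ("high", 3)]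
  (riskFlagsList risk_flags).foldl
    (fun best row =>
      let sev := PySem.Str.lower (PySem.Dict.getD row "severity" "")
      if rank.contains sev && decide (rank.getD sev 0 > rank.getD best 0) then sev else best)
    "none"

-- ===== PORT B =====
-- _max_risk_severity (B): set of present lowercased severities, probed in priority order with early return.
def max_risk_severity_py_alt (risk_flags : List (List (String × String))) : String :=
  let present : PySem.Set String :=
    PySem.Set.ofList ((riskFlagsList risk_flags).map
      (fun row => PySem.Str.lower (PySem.Dict.getD row "severity" "")))
  match ["high", "medium", "low"].find? (fun level => PySem.Set.contains present level) with
  | some level => level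
  | none => "none"

-- ===== PRECONDITION & SPEC =====
def Spec_max_risk_severity_py (risk_flags : List (List (String × String))) (out : String) : Prop := out = max_risk_severity_py_alt risk_flags
instance (risk_flags : List (List (String × String))) (out : String) : Decidable (Spec_max_risk_severity_py risk_flags out) := by unfold Spec_max_risk_severity_py; infer_instance

-- ===== CLAIM (what is proved, stated in full; the proofs are below) =====
def Claim_equal_max_risk_severity_py : Prop := ∀ (risk_flags : List (List (String × String))), Dom_max_risk_severity_py risk_flags → Spec_max_risk_severity_py risk_flags (max_risk_severity_py risk_flags)

-- ===== LEMMAS AND PROOFS =====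

-- numeric rank of a severity string (proof-side abstraction)
def rk (s : String) : Nat :=
  if s = "high" then 3 else if s = "medium" then 2 else if s = "low" then 1 else 0

-- the severity naming a rank
def toSev (n : Nat) : String :=
  if n = 3 then "high" else if n = 2 then "medium" else if n = 1 then "low" else "none"

-- A's per-row update, abstracted to the severity string
def stepA (best sev : String) : String :=
  let rank : PySem.Dict String Int :=
    PySem.Dict.mk [("none", 0), ("low", 1), ("medium", 2), ("high", 3)]
  if rank.contains sev && decide (rank.getD sev 0 > rank.getD best 0) then sev else best

-- running max of ranks
def rkMax (l : List String) (b : Nat) : Nat :=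
  l.foldl (fun m s => max m (rk s)) b

lemma stepA_toSev (b : Nat) (hb : b ≤ 3) (s : String) :
    stepA (toSev b) s = toSev (max b (rk s)) := by
  interval_cases b <;>
    (by_cases h3 : s = "high" <;> by_cases h2 : s = "medium" <;> by_cases h1 : s = "low" <;>
      by_cases h0 : s = "none" <;>
      simp_all [stepA, rk, toSev, PySem.Dict.contains_mk, PySem.Dict.get?_mk_cons,
        PySem.Dict.getD_eq_get?_getD]) <;>
    (rintro (rfl | rfl | rfl | rfl) <;> simp_all)

lemma foldA_eq (l : List String) (b : Nat) (hb : b ≤ 3) :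
    l.foldl stepA (toSev b) = toSev (rkMax l b) := by
  induction l generalizing b with
  | nil => simp [rkMax]
  | cons s t ih =>
    have hrk : rk s ≤ 3 := by unfold rk; split_ifs <;> omega
    simp only [List.foldl_cons, stepA_toSev b hb s, rkMax]
    exact ih (max b (rk s)) (by omega)

lemma rkMax_max (l : List String) (b c : Nat) :
    rkMax l (max b c) = max b (rkMax l c) := by
  induction l generalizing c with
  | nil => simp [rkMax]
  | cons s t ih =>
    simp only [rkMax, List.foldl_cons, Nat.max_assoc]
    exact ih (max c (rk s))

lemma rkMax_zero_cons (s : String) (t : List String) :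
    rkMax (s :: t) 0 = max (rk s) (rkMax t 0) := by
  have := rkMax_max t (rk s) 0
  simpa [rkMax] using this

lemma rkMax_le (l : List String) : rkMax l 0 ≤ 3 := by
  induction l with
  | nil => simp [rkMax]
  | cons s t ih =>
    rw [rkMax_zero_cons]
    have : rk s ≤ 3 := by unfold rk; split_ifs <;> omega
    omega

lemma rk_le_rkMax {s : String} {l : List String} (h : s ∈ l) : rk s ≤ rkMax l 0 := by
  induction l with
  | nil => cases h
  | cons x t ih =>
    rw [rkMax_zero_cons]
    rcases List.mem_cons.mp h with rfl | hm
    · omega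
    · exact le_trans (ih hm) (by omega)

lemma rkMax_mem (l : List String) : rkMax l 0 = 0 ∨ ∃ s ∈ l, rk s = rkMax l 0 := by
  induction l with
  | nil => simp [rkMax]
  | cons x t ih =>
    rw [rkMax_zero_cons]
    rcases Nat.le_total (rk x) (rkMax t 0) with h | h
    · rw [Nat.max_eq_right h]
      rcases ih with h0 | ⟨s, hs, he⟩
      · exact Or.inl h0
      · exact Or.inr ⟨s, List.mem_cons_of_mem _ hs, he⟩
    · rw [Nat.max_eq_left h]
      by_cases hx : rk x = 0
      · rcases ih with h0 | ⟨s, hs, he⟩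
        · omega
        · exact Or.inr ⟨s, List.mem_cons_of_mem _ hs, by omega⟩
      · exact Or.inr ⟨x, List.mem_cons_self, rfl⟩

lemma rk_eq_three {s : String} (h : rk s = 3) : s = "high" := by
  unfold rk at h; split_ifs at h <;> simp_all

lemma rk_eq_two {s : String} (h : rk s = 2) : s = "medium" := by
  unfold rk at h; split_ifs at h <;> simp_all

lemma rk_eq_one {s : String} (h : rk s = 1) : s = "low" := by
  unfold rk at h; split_ifs at h <;> simp_all

-- B's probe, abstracted to the severity list
def probeB (l : List String) : String :=
  match ["high", "medium", "low"].find? (fun level => PySem.Set.contains (PySem.Set.ofList l) level) with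
  | some level => level
  | none => "none"

lemma probeB_eq (l : List String) :
    probeB l = if "high" ∈ l then "high" else if "medium" ∈ l then "medium"
      else if "low" ∈ l then "low" else "none" := by
  have h (x : String) : PySem.Set.contains (PySem.Set.ofList l) x = decide (x ∈ l) := by
    by_cases hx : x ∈ l
    · simp [hx, PySem.Set.mem_ofList]
    · simp [hx, PySem.Set.mem_ofList]
  simp only [probeB, List.find?, h]
  by_cases h3 : "high" ∈ l <;> by_cases h2 : "medium" ∈ l <;> by_cases h1 : "low" ∈ l <;>
    simp [h3, h2, h1]

lemma toSev_rkMax (l : List String) : toSev (rkMax l 0) = probeB l := by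
  rw [probeB_eq]
  have hle := rkMax_le l
  rcases rkMax_mem l with h0 | ⟨s, hs, he⟩
  · rw [h0]
    have nh : "high" ∉ l := fun h => by have := rk_le_rkMax h; simp [rk] at this; omega
    have nm : "medium" ∉ l := fun h => by have := rk_le_rkMax h; simp [rk] at this; omega
    have nl : "low" ∉ l := fun h => by have := rk_le_rkMax h; simp [rk] at this; omega
    simp [toSev, nh, nm, nl]
  · interval_cases hM : (rkMax l 0)
    · have nh : "high" ∉ l := fun h => by have := rk_le_rkMax h; simp [rk] at this; omega
      have nm : "medium" ∉ l := fun h => by have := rk_le_rkMax h; simp [rk] at this; omega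
      have nl : "low" ∉ l := fun h => by have := rk_le_rkMax h; simp [rk] at this; omega
      simp [toSev, nh, nm, nl]
    · have hsl : s = "low" := rk_eq_one (by omega)
      have nh : "high" ∉ l := fun h => by have := rk_le_rkMax h; simp [rk, hM] at this
      have nm : "medium" ∉ l := fun h => by have := rk_le_rkMax h; simp [rk, hM] at this
      subst hsl
      simp [toSev, nh, nm, hs]
    · have hsl : s = "medium" := rk_eq_two (by omega)
      have nh : "high" ∉ l := fun h => by have := rk_le_rkMax h; simp [rk, hM] at this
      subst hsl
      simp [toSev, nh, hs]
    · have hsl : s = "high" := rk_eq_three (by omega)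
      subst hsl
      simp [toSev, hs]

-- ===== VERDICT (by name: the statement is the Claim_ definition above) =====
theorem max_risk_severity_py_spec : Claim_equal_max_risk_severity_py := by
  intro risk_flags _
  unfold Spec_max_risk_severity_py max_risk_severity_py max_risk_severity_py_alt
  set rows := riskFlagsList risk_flags with hrows
  set l := rows.map (fun row => PySem.Str.lower (PySem.Dict.getD row "severity" "")) with hl
  have hA : rows.foldl
      (fun best row =>
        let sev := PySem.Str.lower (PySem.Dict.getD row "severity" "")
        if (PySem.Dict.mk [("none", (0:Int)), ("low", 1), ("medium", 2), ("high", 3)]).contains sev &&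
            decide ((PySem.Dict.mk [("none", (0:Int)), ("low", 1), ("medium", 2), ("high", 3)]).getD sev 0 >
              (PySem.Dict.mk [("none", (0:Int)), ("low", 1), ("medium", 2), ("high", 3)]).getD best 0)
          then sev else best)
      "none" = l.foldl stepA "none" := by
    rw [hl, List.foldl_map]
    rfl
  have h0 : ("none" : String) = toSev 0 := by decide
  calc _ = l.foldl stepA "none" := hA
    _ = toSev (rkMax l 0) := by rw [h0]; exact foldA_eq l 0 (by omega)
    _ = probeB l := toSev_rkMax l
    _ = _ := rfl
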